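-- pv_equiv track=rewrite | github.com/Teacater/Atom | e_configuration.py | get_electron_configuration
-- ===== SOURCE A (Python) =====
-- from typing import Tuple, List
--
-- def get_cap(l: int) -> int:
--     """
--     calculates max number of electrons on layer
--     :param l: layer
--     :return: number of electrons
--     """
--     return ((l - 1) * 2 + 1) * 2
--
-- def get_electron_configuration(electron_number: int) -> Tuple[int, List[Tuple[int, int]]]:
--     """
--     calculates electron configuration
--     :param electron_number: electron number in atom
--     :return: Number of electrons at last layer, Electron configuration as list of n, l quantum numbers
--     """
--     electron_remains = electron_number
--     current_cap = 2
--     current_n = 1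
--     current_l = 1
--     configuration = [(current_n, current_l)]
--     start = 1
--     while electron_remains > current_cap:
--         electron_remains -= current_cap
--         current_n += 1
--         current_l -= 1
--         if current_l < 1 or current_n < 1:
--             current_n = 1
--             start += 1
--             current_l = start
--             while current_l > current_n:
--                 current_n += 1
--                 current_l -= 1
--
--         configuration.append((current_n, current_l))
--         current_cap = get_cap(current_l)
--
--     return electron_remains, configuration
-- ===== SOURCE B (Python) =====
-- from typing import Tuple, List
--
-- def _diagonal(d: int) -> List[Tuple[int, int]]:
--     """subshells (n, l) of Madelung diagonal d, in filling order"""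
--     return [(d + 1 - l, l) for l in range((d + 1) // 2, 0, -1)]
--
-- def get_electron_configuration(electron_number: int) -> Tuple[int, List[Tuple[int, int]]]:
--     remaining = electron_number
--     configuration = [(1, 1)]
--     cap = 2
--     d = 1
--     pending: List[Tuple[int, int]] = []  # rest of diagonal d after the shells already taken
--     while remaining > cap:
--         remaining -= cap
--         if not pending:
--             d += 1
--             pending = _diagonal(d)
--         n, l = pending.pop(0)
--         configuration.append((n, l))
--         cap = (2 * l - 1) * 2
--     return remaining, configuration
-- ===== Notes on version B (the rewrite author's own statement) =====
-- stated objective: alternative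
-- what changed: B generates Madelung subshells diagonal-by-diagonal with a pending list produced by a closed-form comprehension per diagonal, replacing A's mutable (n,l,start) state with its decrement-and-repair inner while loop.
import Mathlib
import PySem

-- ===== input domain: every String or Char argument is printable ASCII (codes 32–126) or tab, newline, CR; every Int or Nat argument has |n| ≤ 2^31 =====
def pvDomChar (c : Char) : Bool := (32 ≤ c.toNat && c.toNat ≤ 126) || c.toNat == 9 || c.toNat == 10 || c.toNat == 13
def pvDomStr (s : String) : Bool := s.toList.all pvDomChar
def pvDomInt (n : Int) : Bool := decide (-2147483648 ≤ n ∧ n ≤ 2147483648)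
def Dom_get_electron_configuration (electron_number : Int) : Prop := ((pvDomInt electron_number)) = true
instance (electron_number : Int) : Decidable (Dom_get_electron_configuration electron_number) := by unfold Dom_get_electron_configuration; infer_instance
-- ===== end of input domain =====

-- B replaces A's state-patching subshell stepper (decrement-and-repair with an inner while)
-- by direct diagonal-by-diagonal generation of Madelung subshells (objective: alternative decomposition).

-- ===== PORT A =====

def get_cap (l : Int) : Int := ((l - 1) * 2 + 1) * 2

-- inner 'while current_l > current_n' loop of A
def fixDiag (n l : Int) : Int × Int :=
  if l > n then fixDiag (n + 1) (l - 1) else (n, l)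
termination_by (l - n).toNat
decreasing_by omega

-- outer 'while electron_remains > current_cap' loop of A; fuel is ample (each
-- iteration subtracts current_cap ≥ 2), so the fuel-out branch is never reached.
def loopA (fuel : Nat) (remains cap n l start : Int) (config : List (Int × Int)) :
    Int × List (Int × Int) :=
  match fuel with
  | 0 => (remains, config)
  | fuel + 1 =>
    if remains > cap then
      let remains' := remains - cap
      let n1 := n + 1
      let l1 := l - 1
      let (n2, l2, start2) :=
        if l1 < 1 ∨ n1 < 1 then
          let start' := start + 1
          let (n3, l3) := fixDiag 1 start'
          (n3, l3, start')
        else (n1, l1, start)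
      loopA fuel remains' (get_cap l2) n2 l2 start2 (config ++ [(n2, l2)])
    else (remains, config)

def get_electron_configuration (electron_number : Int) : Int × (List (Int × Int)) :=
  loopA (electron_number.toNat + 1) electron_number 2 1 1 1 [(1, 1)]

-- ===== PORT B =====

-- subshells (n, l) of Madelung diagonal d, in filling order
def diagonal (d : Int) : List (Int × Int) :=
  (PySem.List.pyRange (PySem.Int.floordiv (d + 1) 2) 0 (-1)).map (fun l => (d + 1 - l, l))

-- B's 'while remaining > cap' loop; same ample fuel.
def loopB (fuel : Nat) (remaining cap d : Int) (pending : List (Int × Int))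
    (config : List (Int × Int)) : Int × List (Int × Int) :=
  match fuel with
  | 0 => (remaining, config)
  | fuel + 1 =>
    if remaining > cap then
      let remaining' := remaining - cap
      let (d', pending') := if pending.isEmpty then (d + 1, diagonal (d + 1)) else (d, pending)
      match pending' with
      | [] => (remaining', config)   -- unreachable: a freshly generated diagonal is nonempty
      | (n, l) :: rest =>
        loopB fuel remaining' ((2 * l - 1) * 2) d' rest (config ++ [(n, l)])
    else (remaining, config)

def get_electron_configuration_alt (electron_number : Int) : Int × (List (Int × Int)) :=
  loopB (electron_number.toNat + 1) electron_number 2 1 [] [(1, 1)]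

-- ===== PRECONDITION & SPEC =====
def Spec_get_electron_configuration (electron_number : Int) (out : Int × (List (Int × Int))) : Prop := out = get_electron_configuration_alt electron_number
instance (electron_number : Int) (out : Int × (List (Int × Int))) : Decidable (Spec_get_electron_configuration electron_number out) := by unfold Spec_get_electron_configuration; infer_instance

-- ===== CLAIM (what is proved, stated in full; the proofs are below) =====
def Claim_equal_get_electron_configuration : Prop := ∀ (electron_number : Int), Dom_get_electron_configuration electron_number → Spec_get_electron_configuration electron_number (get_electron_configuration electron_number)

-- ===== LEMMAS AND PROOFS =====

-- A's inner repair loop lands on the midpoint of the diagonal n + l.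
theorem fixDiag_eq (n l : Int) (hn : 1 ≤ n) (hl : n ≤ l + 1) :
    fixDiag n l = (n + l - (n + l) / 2, (n + l) / 2) := by
  rw [fixDiag]
  split
  · rename_i h
    rw [fixDiag_eq (n + 1) (l - 1) (by omega) (by omega)]
    simp only [Prod.mk.injEq]
    constructor <;> omega
  · rename_i h
    simp only [Prod.mk.injEq]
    constructor <;> omega
termination_by (l - n).toNat
decreasing_by omega

-- Bisimulation: A's walking state (n, l, start) matches B's (d, pending) state.
theorem loop_bisim (fuel : Nat) (remains cap n l d : Int) (config : List (Int × Int))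
    (hl : 1 ≤ l) (hn : 1 ≤ n) (hnl : n + l = d + 1) :
    loopA fuel remains cap n l d config =
      loopB fuel remains cap d
        ((PySem.List.pyRange (l - 1) 0 (-1)).map (fun l' => (d + 1 - l', l'))) config := by
  induction fuel generalizing remains cap n l d config with
  | zero => rfl
  | succ f ih =>
    rw [loopA, loopB]
    by_cases hr : remains > cap
    · simp only [if_pos hr]
      by_cases hl1 : l = 1
      · -- end of the diagonal: A repairs via fixDiag, B generates diagonal (d+1)
        subst hl1
        simp only [show ((1:Int) - 1 < 1 ∨ n + 1 < 1) from by omega, if_pos]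
        rw [fixDiag_eq 1 (d + 1) (by omega) (by omega)]
        rw [PySem.List.pyRange_neg_one_eq_nil (by omega : (1:Int) - 1 ≤ 0)]
        simp only [List.map_nil, List.isEmpty_nil, reduceIte]
        unfold diagonal
        rw [PySem.Int.floordiv_eq_ediv_of_pos (by omega : (0:Int) < 2)]
        have hd : 1 ≤ d := by omega
        rw [PySem.List.pyRange_neg_one_cons (by omega : (0:Int) < (d + 1 + 1) / 2)]
        simp only [List.map_cons]
        have hn3 : 1 + (d + 1) - (1 + (d + 1)) / 2 = d + 1 + 1 - (d + 1 + 1) / 2 := by omega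
        have hl3 : (1 + (d + 1)) / 2 = (d + 1 + 1) / 2 := by omega
        rw [hn3, hl3]
        have hcap : get_cap ((d + 1 + 1) / 2) = (2 * ((d + 1 + 1) / 2) - 1) * 2 := by
          unfold get_cap; ring
        rw [hcap]
        exact ih (remains - cap) ((2 * ((d + 1 + 1) / 2) - 1) * 2)
          (d + 1 + 1 - (d + 1 + 1) / 2) ((d + 1 + 1) / 2) (d + 1)
          (config ++ [(d + 1 + 1 - (d + 1 + 1) / 2, (d + 1 + 1) / 2)])
          (by omega) (by omega) (by omega)
      · -- inside the diagonal: both step to (n+1, l-1)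
        have hl2 : 2 ≤ l := by omega
        simp only [show ¬(l - 1 < 1 ∨ n + 1 < 1) from by omega, reduceIte]
        rw [PySem.List.pyRange_neg_one_cons (by omega : (0:Int) < l - 1)]
        simp only [List.map_cons, List.isEmpty_cons, Bool.false_eq_true, if_neg,
          not_false_eq_true]
        have hcap : get_cap (l - 1) = (2 * (l - 1) - 1) * 2 := by unfold get_cap; ring
        have hhd : d + 1 - (l - 1) = n + 1 := by omega
        rw [hhd, hcap]
        have := ih (remains - cap) ((2 * (l - 1) - 1) * 2) (n + 1) (l - 1) d
          (config ++ [(n + 1, l - 1)]) (by omega) (by omega) (by omega)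
        simpa using this
    · simp only [if_neg hr]

-- ===== VERDICT (by name: the statement is the Claim_ definition above) =====
theorem get_electron_configuration_spec : Claim_equal_get_electron_configuration := by
  intro en _
  show _ = _
  unfold get_electron_configuration get_electron_configuration_alt
  have h := loop_bisim (en.toNat + 1) en 2 1 1 1 [(1, 1)] (by omega) (by omega) (by omega)
  simpa [PySem.List.pyRange_neg_one_eq_nil (by omega : (0:Int) ≤ 0)] using h
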